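-- pv_equiv track=rewrite | github.com/GearKite/Matrix-space-via-updater | main.py | get_highest_level_members
-- ===== SOURCE A (Python) =====
-- def get_highest_level_members(member_levels, threshold=50):
--     highest_value = max(member_levels.values())
--
--     if highest_value <= threshold:
--         return []
--
--     items_with_highest_value = [
--         key for key, value in member_levels.items() if value == highest_value
--     ]
--
--     return items_with_highest_value
-- ===== SOURCE B (Python) =====
-- def get_highest_level_members(member_levels, threshold=50):
--     best = None
--     keys = []
--     for key, value in member_levels.items():
--         if best is None or value > best:
--             best = value
--             keys = [key]
--         elif value == best:
--             keys.append(key)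
--     if best is None or best <= threshold:
--         return []
--     return keys
-- ===== Notes on version B (the rewrite author's own statement) =====
-- stated objective: alternative
-- what changed: Replaces the two sequential passes (max over values, then a filtering comprehension) with a single loop that maintains a running best value and the list of keys attaining it, resetting the list on a new maximum.
import Mathlib
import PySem

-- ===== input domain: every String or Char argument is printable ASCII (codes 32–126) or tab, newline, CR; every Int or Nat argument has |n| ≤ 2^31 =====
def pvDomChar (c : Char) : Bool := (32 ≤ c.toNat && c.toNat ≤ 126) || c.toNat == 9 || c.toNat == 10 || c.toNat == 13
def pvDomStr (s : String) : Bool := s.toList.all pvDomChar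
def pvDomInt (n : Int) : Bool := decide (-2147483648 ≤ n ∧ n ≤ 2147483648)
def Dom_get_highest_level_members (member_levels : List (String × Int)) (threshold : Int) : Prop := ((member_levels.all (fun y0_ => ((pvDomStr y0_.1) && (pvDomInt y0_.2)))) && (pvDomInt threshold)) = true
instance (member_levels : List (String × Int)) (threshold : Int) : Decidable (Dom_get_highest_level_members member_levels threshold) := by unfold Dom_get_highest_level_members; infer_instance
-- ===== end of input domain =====

-- B replaces A's two passes (max over values, then filter) by one loop keeping a running
-- best value and the keys attaining it (alternative decomposition, same cost).


-- ===== PORT A =====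
def get_highest_level_members (member_levels : List (String × Int)) (threshold : Int) : List String :=
  match PySem.List.max? (member_levels.map Prod.snd) (fun y => y) with
  | none => []            -- max() raises ValueError on the empty dict; excluded by Pre_
  | some highest_value =>
    if highest_value ≤ threshold then []
    else (member_levels.filter (fun kv => kv.2 == highest_value)).map Prod.fst

-- ===== PORT B =====
def pvAltLoop : List (String × Int) → Option Int → List String → Option Int × List String
  | [], best, keys => (best, keys)
  | (k, v) :: rest, best, keys =>
    match best with
    | none => pvAltLoop rest (some v) [k]
    | some b =>
      if v > b then pvAltLoop rest (some v) [k]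
      else if v == b then pvAltLoop rest (some b) (keys ++ [k])
      else pvAltLoop rest (some b) keys

def get_highest_level_members_alt (member_levels : List (String × Int)) (threshold : Int) : List String :=
  match pvAltLoop member_levels none [] with
  | (none, _) => []
  | (some best, keys) => if best ≤ threshold then [] else keys

-- ===== PRECONDITION & SPEC =====
-- Pre_ excludes only the empty dict, on which A's max() raises ValueError.
def Pre_get_highest_level_members (member_levels : List (String × Int)) (threshold : Int) : Prop :=
  member_levels ≠ []
instance (member_levels : List (String × Int)) (threshold : Int) : Decidable (Pre_get_highest_level_members member_levels threshold) := by unfold Pre_get_highest_level_members; infer_instance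

def pvWitness_get_highest_level_members : (List (String × Int)) × Int := ([("alice", 100), ("bob", 100), ("carol", 7)], 50)

def Spec_get_highest_level_members (member_levels : List (String × Int)) (threshold : Int) (out : List String) : Prop := out = get_highest_level_members_alt member_levels threshold
instance (member_levels : List (String × Int)) (threshold : Int) (out : List String) : Decidable (Spec_get_highest_level_members member_levels threshold out) := by unfold Spec_get_highest_level_members; infer_instance

-- ===== CLAIM =====
def Claim_equal_get_highest_level_members : Prop := ∀ (member_levels : List (String × Int)) (threshold : Int), Dom_get_highest_level_members member_levels threshold → Pre_get_highest_level_members member_levels threshold → Spec_get_highest_level_members member_levels threshold (get_highest_level_members member_levels threshold)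


-- ===== LEMMAS AND PROOFS =====

-- Invariant of B's loop once best = some b: the final best is the running max, and the final
-- key list is the per-value filter of the rest, prefixed by keys iff b survives as the max.
theorem pvLeFoldlMax (l : List Int) (c : Int) : c ≤ l.foldl max c := by
  induction l generalizing c with
  | nil => simp
  | cons h t ih => exact le_trans (le_max_left c h) (ih (max c h))

theorem pvAltLoop_inv (l : List (String × Int)) (b : Int) (keys : List String) :
    pvAltLoop l (some b) keys =
      (some ((l.map Prod.snd).foldl max b),
       (if b = (l.map Prod.snd).foldl max b then keys else [])
         ++ (l.filter (fun kv => kv.2 == (l.map Prod.snd).foldl max b)).map Prod.fst) := by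
  induction l generalizing b keys with
  | nil => simp [pvAltLoop]
  | cons hd tl ih =>
    obtain ⟨k, v⟩ := hd
    simp only [List.map_cons, List.foldl_cons, List.filter_cons]
    by_cases hgt : v > b
    · have hmv : max b v = v := by omega
      rw [pvAltLoop, if_pos hgt, ih]; simp only [hmv]
      have hb : ¬ b = (tl.map Prod.snd).foldl max v := by
        have := pvLeFoldlMax (tl.map Prod.snd) v; omega
      by_cases hv : v = (tl.map Prod.snd).foldl max v
      · have hbv : ¬ b = v := by omega
        simp [← hv, hbv]
      · simp [hv, hb]
    · have hm : max b v = b := by omega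
      by_cases heq : v = b
      · subst heq
        rw [pvAltLoop, if_neg hgt, if_pos (by simp), ih]; simp only [hm]
        by_cases hv : v = (tl.map Prod.snd).foldl max v
        · simp [← hv]
        · simp [hv]
      · rw [pvAltLoop, if_neg hgt, if_neg (by simp [heq]), ih]; simp only [hm]
        have hvne : ¬ v = (tl.map Prod.snd).foldl max b := by
          have := pvLeFoldlMax (tl.map Prod.snd) b; omega
        simp [hvne]

theorem get_highest_level_members_spec : Claim_equal_get_highest_level_members := by
  intro ml t _ hpre
  unfold Spec_get_highest_level_members
  match ml, hpre with
  | (k, v) :: rest, _ =>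
    unfold get_highest_level_members get_highest_level_members_alt
    rw [List.map_cons, PySem.List.max?_id_cons]
    rw [show pvAltLoop ((k, v) :: rest) none [] = pvAltLoop rest (some v) [k] from rfl,
       pvAltLoop_inv]
    by_cases hv : v = (rest.map Prod.snd).foldl max v
    · simp [← hv]
    · simp [hv]
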